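-- pv_equiv track=rewrite | github.com/eric1hello/vibe-gpu | tools/fp4_soft.py | encode_fp4
-- ===== SOURCE A (Python) =====
-- FIX = 256  # 与 RTL 中定点缩放一致（2^8）
--
-- def encode_fp4(val_fix: int) -> int:
--     """从定点有符号值编码为 FP4 nibble。"""
--     if val_fix == 0:
--         return 0
--     neg = val_fix < 0
--     absv = -val_fix if neg else val_fix
--     best_e, best_m, best_err = 1, 0, 1 << 30
--     for e in range(1, 4):
--         for m in range(2):
--             tgt = ((1 << (e - 1)) * (2 + m) * FIX) >> 1
--             err = abs(absv - tgt)
--             if err < best_err: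
--                 best_err = err
--                 best_e, best_m = e, m
--     s = 1 if neg else 0
--     return s << 3 | best_e << 1 | best_m
-- ===== SOURCE B (Python) =====
-- FIX = 256
--
-- def encode_fp4(val_fix: int) -> int:
--     """Threshold-chain FP4 encoder: classify |val| by the midpoints between
--     the six representable targets instead of scanning all (e, m) pairs."""
--     if val_fix == 0:
--         return 0
--     absv = abs(val_fix)
--     # targets: FIX*(2+m)*2^(e-1)/2 for e=1..3, m=0..1 -> 256,384,512,768,1024,1536
--     # integer midpoints (ties round to the earlier/smaller target): 320,448,640,896,1280
--     if absv <= 5 * FIX // 4:        # 320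
--         e, m = 1, 0
--     elif absv <= 7 * FIX // 4:      # 448
--         e, m = 1, 1
--     elif absv <= 5 * FIX // 2:      # 640
--         e, m = 2, 0
--     elif absv <= 7 * FIX // 2:      # 896
--         e, m = 2, 1
--     elif absv <= 5 * FIX:           # 1280
--         e, m = 3, 0
--     else:
--         e, m = 3, 1
--     s = 1 if val_fix < 0 else 0
--     return s << 3 | e << 1 | m
-- ===== Notes on version B (the rewrite author's own statement) =====
-- stated objective: simpler
-- what changed: Replaces A's exhaustive best-error scan over all six (e,m) candidates (nested loops tracking best_e/best_m/best_err) with a direct classification of |val_fix| by chained comparisons against the five integer midpoints between the six representable targets.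
-- intended difference: For |val_fix| >= 1073743360 every candidate's error reaches A's huge best_err initializer, so no update ever fires and A returns the code assembled from the initial (best_e, best_m) = (1, 0), while B returns the code of the nearest representable target (3, 1), the intended value for a magnitude encoder. — e.g. on encode_fp4(1073743360): A returns 2, B returns 7
import Mathlib
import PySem

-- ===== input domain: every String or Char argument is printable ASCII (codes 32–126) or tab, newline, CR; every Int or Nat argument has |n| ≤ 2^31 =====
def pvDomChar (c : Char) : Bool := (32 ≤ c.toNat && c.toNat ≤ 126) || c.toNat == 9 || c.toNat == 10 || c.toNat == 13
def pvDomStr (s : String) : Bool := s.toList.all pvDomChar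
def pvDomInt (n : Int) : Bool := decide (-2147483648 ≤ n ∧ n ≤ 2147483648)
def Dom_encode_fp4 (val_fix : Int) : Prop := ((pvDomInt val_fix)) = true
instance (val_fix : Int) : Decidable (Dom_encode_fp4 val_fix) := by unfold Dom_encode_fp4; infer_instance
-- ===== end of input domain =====

-- B replaces A's exhaustive best-error scan over all (e, m) pairs by a chain of midpoint
-- threshold comparisons on |val_fix| (objective: simpler; no speed claim).

-- ===== PORT A =====
def encode_fp4 (val_fix : Int) : Int :=
  if val_fix = 0 then 0
  else
    let neg := val_fix < 0
    let absv := if neg then -val_fix else val_fix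
    -- state (best_e, best_m, best_err), initialised to (1, 0, 1 << 30)
    let st : Int × Int × Int :=
      (PySem.List.pyRange 1 4 1).foldl (fun (st : Int × Int × Int) (e : Int) =>
        (PySem.List.pyRange 0 2 1).foldl (fun (st : Int × Int × Int) (m : Int) =>
          let tgt : Int := (((1 : Int) <<< (e - 1).toNat) * (2 + m) * 256) >>> 1
          let err := |absv - tgt|
          if err < st.2.2 then (e, m, err) else st) st)
        (1, 0, (1 : Int) <<< 30)
    let s : Int := if neg then 1 else 0
    PySem.Int.bor (PySem.Int.bor (s <<< 3) (st.1 <<< 1)) st.2.1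

-- ===== PORT B =====
def encode_fp4_alt (val_fix : Int) : Int :=
  if val_fix = 0 then 0
  else
    let absv := |val_fix|
    let em : Int × Int :=
      if absv ≤ 5 * 256 / 4 then (1, 0)
      else if absv ≤ 7 * 256 / 4 then (1, 1)
      else if absv ≤ 5 * 256 / 2 then (2, 0)
      else if absv ≤ 7 * 256 / 2 then (2, 1)
      else if absv ≤ 5 * 256 then (3, 0)
      else (3, 1)
    let s : Int := if val_fix < 0 then 1 else 0
    PySem.Int.bor (PySem.Int.bor (s <<< 3) (em.1 <<< 1)) em.2

-- ===== PRECONDITION & SPEC =====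
-- For |val_fix| ≥ 1073743360 every candidate's error reaches A's huge best_err initializer, so no
-- update ever fires and A returns the code assembled from the initial (best_e, best_m) = (1, 0)
-- instead of any nearest value; B returns the nearest representable code (3, 1), the intended value.
def D_encode_fp4 (val_fix : Int) : Prop := 1073743360 ≤ |val_fix|
instance (val_fix : Int) : Decidable (D_encode_fp4 val_fix) := by unfold D_encode_fp4; infer_instance

def Spec_encode_fp4 (val_fix : Int) (out : Int) : Prop := ¬ D_encode_fp4 val_fix → out = encode_fp4_alt val_fix
instance (val_fix : Int) (out : Int) : Decidable (Spec_encode_fp4 val_fix out) := by unfold Spec_encode_fp4; infer_instance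

def pvDiffWitness_encode_fp4 : Int := 1073743360
def pvDiffWitnessOut_encode_fp4 : Int × Int := (2, 7)

-- ===== CLAIM (what is proved, stated in full; the proofs are below) =====
def Claim_unchanged_encode_fp4 : Prop := ∀ (val_fix : Int), Dom_encode_fp4 val_fix → Spec_encode_fp4 val_fix (encode_fp4 val_fix)
def Claim_changed_encode_fp4 : Prop := Dom_encode_fp4 (pvDiffWitness_encode_fp4) ∧ D_encode_fp4 (pvDiffWitness_encode_fp4) ∧ encode_fp4 (pvDiffWitness_encode_fp4) = pvDiffWitnessOut_encode_fp4.1 ∧ encode_fp4_alt (pvDiffWitness_encode_fp4) = pvDiffWitnessOut_encode_fp4.2 ∧ pvDiffWitnessOut_encode_fp4.1 ≠ pvDiffWitnessOut_encode_fp4.2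
def Claim_exact_encode_fp4 : Prop := ∀ (val_fix : Int), Dom_encode_fp4 val_fix → D_encode_fp4 val_fix → encode_fp4 val_fix ≠ encode_fp4_alt val_fix

-- ===== LEMMAS AND PROOFS =====
theorem pyRange14 : PySem.List.pyRange 1 4 1 = [1, 2, 3] := by decide
theorem pyRange02 : PySem.List.pyRange 0 2 1 = [0, 1] := by decide

set_option maxHeartbeats 1000000 in
theorem main_eq (v : Int) (hD : ¬ D_encode_fp4 v) : encode_fp4 v = encode_fp4_alt v := by
  unfold D_encode_fp4 at hD
  rw [not_le, Int.abs_eq_natAbs] at hD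
  by_cases h0 : v = 0
  · simp [encode_fp4, encode_fp4_alt, h0]
  · rcases lt_or_ge v 0 with hs | hs
    ·
      simp only [encode_fp4, encode_fp4_alt, h0, pyRange14, pyRange02, List.foldl_cons,
        List.foldl_nil, hs, if_true, if_false, if_neg h0,
        show ((1:Int) - 1).toNat = 0 from by decide, show ((2:Int) - 1).toNat = 1 from by decide,
        show ((3:Int) - 1).toNat = 2 from by decide,
        show (1:Int) <<< (0:Nat) = 1 from by decide, show (1:Int) <<< (1:Nat) = 2 from by decide,
        show (1:Int) <<< (2:Nat) = 4 from by decide, show (1:Int) <<< (30:Int) = 1073741824 from by decide,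
        show ((1:Int) * (2 + 0) * 256) >>> 1 = 256 from by decide,
        show ((1:Int) * (2 + 1) * 256) >>> 1 = 384 from by decide,
        show ((2:Int) * (2 + 0) * 256) >>> 1 = 512 from by decide,
        show ((2:Int) * (2 + 1) * 256) >>> 1 = 768 from by decide,
        show ((4:Int) * (2 + 0) * 256) >>> 1 = 1024 from by decide,
        show ((4:Int) * (2 + 1) * 256) >>> 1 = 1536 from by decide,
        show (5 * 256 / 4 : Int) = 320 from by decide, show (7 * 256 / 4 : Int) = 448 from by decide,
        show (5 * 256 / 2 : Int) = 640 from by decide, show (7 * 256 / 2 : Int) = 896 from by decide,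
        show (5 * 256 : Int) = 1280 from by decide,
        show ((1280:Int) / 4) = 320 from by decide, show ((1280:Int) / 2) = 640 from by decide]
      simp only [Int.abs_eq_natAbs]
      by_cases hb1 : ((v.natAbs : Int)) ≤ 320
      · -- bucket 1
        have ha1 : (((-v - 256).natAbs : Int)) < 1073741824 := by omega
        have ha2 : ¬ ((((-v - 384).natAbs : Int)) < (((-v - 256).natAbs : Int))) := by omega
        have ha3 : ¬ ((((-v - 512).natAbs : Int)) < (((-v - 256).natAbs : Int))) := by omega
        have ha4 : ¬ ((((-v - 768).natAbs : Int)) < (((-v - 256).natAbs : Int))) := by omega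
        have ha5 : ¬ ((((-v - 1024).natAbs : Int)) < (((-v - 256).natAbs : Int))) := by omega
        have ha6 : ¬ ((((-v - 1536).natAbs : Int)) < (((-v - 256).natAbs : Int))) := by omega
        simp only [ha1, ha2, ha3, ha4, ha5, ha6, hb1, if_true, if_false]
        try decide
      by_cases hb2 : ((v.natAbs : Int)) ≤ 448
      · -- bucket 2
        have ha1 : (((-v - 256).natAbs : Int)) < 1073741824 := by omega
        have ha2 : (((-v - 384).natAbs : Int)) < (((-v - 256).natAbs : Int)) := by omega
        have ha3 : ¬ ((((-v - 512).natAbs : Int)) < (((-v - 384).natAbs : Int))) := by omega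
        have ha4 : ¬ ((((-v - 768).natAbs : Int)) < (((-v - 384).natAbs : Int))) := by omega
        have ha5 : ¬ ((((-v - 1024).natAbs : Int)) < (((-v - 384).natAbs : Int))) := by omega
        have ha6 : ¬ ((((-v - 1536).natAbs : Int)) < (((-v - 384).natAbs : Int))) := by omega
        simp only [ha1, ha2, ha3, ha4, ha5, ha6, hb1, hb2, if_true, if_false]
        try decide
      by_cases hb3 : ((v.natAbs : Int)) ≤ 640
      · -- bucket 3
        have ha1 : (((-v - 256).natAbs : Int)) < 1073741824 := by omega
        have ha2 : (((-v - 384).natAbs : Int)) < (((-v - 256).natAbs : Int)) := by omega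
        have ha3 : (((-v - 512).natAbs : Int)) < (((-v - 384).natAbs : Int)) := by omega
        have ha4 : ¬ ((((-v - 768).natAbs : Int)) < (((-v - 512).natAbs : Int))) := by omega
        have ha5 : ¬ ((((-v - 1024).natAbs : Int)) < (((-v - 512).natAbs : Int))) := by omega
        have ha6 : ¬ ((((-v - 1536).natAbs : Int)) < (((-v - 512).natAbs : Int))) := by omega
        simp only [ha1, ha2, ha3, ha4, ha5, ha6, hb1, hb2, hb3, if_true, if_false]
        try decide
      by_cases hb4 : ((v.natAbs : Int)) ≤ 896
      · -- bucket 4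
        have ha1 : (((-v - 256).natAbs : Int)) < 1073741824 := by omega
        have ha2 : (((-v - 384).natAbs : Int)) < (((-v - 256).natAbs : Int)) := by omega
        have ha3 : (((-v - 512).natAbs : Int)) < (((-v - 384).natAbs : Int)) := by omega
        have ha4 : (((-v - 768).natAbs : Int)) < (((-v - 512).natAbs : Int)) := by omega
        have ha5 : ¬ ((((-v - 1024).natAbs : Int)) < (((-v - 768).natAbs : Int))) := by omega
        have ha6 : ¬ ((((-v - 1536).natAbs : Int)) < (((-v - 768).natAbs : Int))) := by omega
        simp only [ha1, ha2, ha3, ha4, ha5, ha6, hb1, hb2, hb3, hb4, if_true, if_false]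
        try decide
      by_cases hb5 : ((v.natAbs : Int)) ≤ 1280
      · -- bucket 5
        have ha1 : (((-v - 256).natAbs : Int)) < 1073741824 := by omega
        have ha2 : (((-v - 384).natAbs : Int)) < (((-v - 256).natAbs : Int)) := by omega
        have ha3 : (((-v - 512).natAbs : Int)) < (((-v - 384).natAbs : Int)) := by omega
        have ha4 : (((-v - 768).natAbs : Int)) < (((-v - 512).natAbs : Int)) := by omega
        have ha5 : (((-v - 1024).natAbs : Int)) < (((-v - 768).natAbs : Int)) := by omega
        have ha6 : ¬ ((((-v - 1536).natAbs : Int)) < (((-v - 1024).natAbs : Int))) := by omega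
        simp only [ha1, ha2, ha3, ha4, ha5, ha6, hb1, hb2, hb3, hb4, hb5, if_true, if_false]
        try decide
      -- bucket 6, sub-split by which candidate first beats the 1 <<< 30 initializer
      by_cases hc1 : ((v.natAbs : Int)) < 1073742080
      · -- first update at candidate 1
        have ha1 : (((-v - 256).natAbs : Int)) < 1073741824 := by omega
        have ha2 : (((-v - 384).natAbs : Int)) < (((-v - 256).natAbs : Int)) := by omega
        have ha3 : (((-v - 512).natAbs : Int)) < (((-v - 384).natAbs : Int)) := by omega
        have ha4 : (((-v - 768).natAbs : Int)) < (((-v - 512).natAbs : Int)) := by omega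
        have ha5 : (((-v - 1024).natAbs : Int)) < (((-v - 768).natAbs : Int)) := by omega
        have ha6 : (((-v - 1536).natAbs : Int)) < (((-v - 1024).natAbs : Int)) := by omega
        simp only [ha1, ha2, ha3, ha4, ha5, ha6, hb1, hb2, hb3, hb4, hb5, hc1, if_true, if_false]
        try decide
      by_cases hc2 : ((v.natAbs : Int)) < 1073742208
      · -- first update at candidate 2
        have ha1 : ¬ ((((-v - 256).natAbs : Int)) < 1073741824) := by omega
        have ha2 : (((-v - 384).natAbs : Int)) < 1073741824 := by omega
        have ha3 : (((-v - 512).natAbs : Int)) < (((-v - 384).natAbs : Int)) := by omega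
        have ha4 : (((-v - 768).natAbs : Int)) < (((-v - 512).natAbs : Int)) := by omega
        have ha5 : (((-v - 1024).natAbs : Int)) < (((-v - 768).natAbs : Int)) := by omega
        have ha6 : (((-v - 1536).natAbs : Int)) < (((-v - 1024).natAbs : Int)) := by omega
        simp only [ha1, ha2, ha3, ha4, ha5, ha6, hb1, hb2, hb3, hb4, hb5, hc1, hc2, if_true, if_false]
        try decide
      by_cases hc3 : ((v.natAbs : Int)) < 1073742336
      · -- first update at candidate 3
        have ha1 : ¬ ((((-v - 256).natAbs : Int)) < 1073741824) := by omega
        have ha2 : ¬ ((((-v - 384).natAbs : Int)) < 1073741824) := by omega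
        have ha3 : (((-v - 512).natAbs : Int)) < 1073741824 := by omega
        have ha4 : (((-v - 768).natAbs : Int)) < (((-v - 512).natAbs : Int)) := by omega
        have ha5 : (((-v - 1024).natAbs : Int)) < (((-v - 768).natAbs : Int)) := by omega
        have ha6 : (((-v - 1536).natAbs : Int)) < (((-v - 1024).natAbs : Int)) := by omega
        simp only [ha1, ha2, ha3, ha4, ha5, ha6, hb1, hb2, hb3, hb4, hb5, hc1, hc2, hc3, if_true, if_false]
        try decide
      by_cases hc4 : ((v.natAbs : Int)) < 1073742592
      · -- first update at candidate 4
        have ha1 : ¬ ((((-v - 256).natAbs : Int)) < 1073741824) := by omega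
        have ha2 : ¬ ((((-v - 384).natAbs : Int)) < 1073741824) := by omega
        have ha3 : ¬ ((((-v - 512).natAbs : Int)) < 1073741824) := by omega
        have ha4 : (((-v - 768).natAbs : Int)) < 1073741824 := by omega
        have ha5 : (((-v - 1024).natAbs : Int)) < (((-v - 768).natAbs : Int)) := by omega
        have ha6 : (((-v - 1536).natAbs : Int)) < (((-v - 1024).natAbs : Int)) := by omega
        simp only [ha1, ha2, ha3, ha4, ha5, ha6, hb1, hb2, hb3, hb4, hb5, hc1, hc2, hc3, hc4, if_true, if_false]
        try decide
      by_cases hc5 : ((v.natAbs : Int)) < 1073742848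
      · -- first update at candidate 5
        have ha1 : ¬ ((((-v - 256).natAbs : Int)) < 1073741824) := by omega
        have ha2 : ¬ ((((-v - 384).natAbs : Int)) < 1073741824) := by omega
        have ha3 : ¬ ((((-v - 512).natAbs : Int)) < 1073741824) := by omega
        have ha4 : ¬ ((((-v - 768).natAbs : Int)) < 1073741824) := by omega
        have ha5 : (((-v - 1024).natAbs : Int)) < 1073741824 := by omega
        have ha6 : (((-v - 1536).natAbs : Int)) < (((-v - 1024).natAbs : Int)) := by omega
        simp only [ha1, ha2, ha3, ha4, ha5, ha6, hb1, hb2, hb3, hb4, hb5, hc1, hc2, hc3, hc4, hc5, if_true, if_false]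
        try decide
      · -- first update at the last candidate (e,m)=(3,1)
        have ha1 : ¬ ((((-v - 256).natAbs : Int)) < 1073741824) := by omega
        have ha2 : ¬ ((((-v - 384).natAbs : Int)) < 1073741824) := by omega
        have ha3 : ¬ ((((-v - 512).natAbs : Int)) < 1073741824) := by omega
        have ha4 : ¬ ((((-v - 768).natAbs : Int)) < 1073741824) := by omega
        have ha5 : ¬ ((((-v - 1024).natAbs : Int)) < 1073741824) := by omega
        have ha6 : (((-v - 1536).natAbs : Int)) < 1073741824 := by omega
        simp only [ha1, ha2, ha3, ha4, ha5, ha6, hb1, hb2, hb3, hb4, hb5, hc1, hc2, hc3, hc4, hc5, if_true, if_false]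
        try decide
    ·
      simp only [encode_fp4, encode_fp4_alt, h0, pyRange14, pyRange02, List.foldl_cons,
        List.foldl_nil, show ¬ (v < 0) from not_lt.mpr hs, if_true, if_false, if_neg h0,
        show ((1:Int) - 1).toNat = 0 from by decide, show ((2:Int) - 1).toNat = 1 from by decide,
        show ((3:Int) - 1).toNat = 2 from by decide,
        show (1:Int) <<< (0:Nat) = 1 from by decide, show (1:Int) <<< (1:Nat) = 2 from by decide,
        show (1:Int) <<< (2:Nat) = 4 from by decide, show (1:Int) <<< (30:Int) = 1073741824 from by decide,
        show ((1:Int) * (2 + 0) * 256) >>> 1 = 256 from by decide,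
        show ((1:Int) * (2 + 1) * 256) >>> 1 = 384 from by decide,
        show ((2:Int) * (2 + 0) * 256) >>> 1 = 512 from by decide,
        show ((2:Int) * (2 + 1) * 256) >>> 1 = 768 from by decide,
        show ((4:Int) * (2 + 0) * 256) >>> 1 = 1024 from by decide,
        show ((4:Int) * (2 + 1) * 256) >>> 1 = 1536 from by decide,
        show (5 * 256 / 4 : Int) = 320 from by decide, show (7 * 256 / 4 : Int) = 448 from by decide,
        show (5 * 256 / 2 : Int) = 640 from by decide, show (7 * 256 / 2 : Int) = 896 from by decide,
        show (5 * 256 : Int) = 1280 from by decide,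
        show ((1280:Int) / 4) = 320 from by decide, show ((1280:Int) / 2) = 640 from by decide]
      simp only [Int.abs_eq_natAbs]
      by_cases hb1 : ((v.natAbs : Int)) ≤ 320
      · -- bucket 1
        have ha1 : (((v - 256).natAbs : Int)) < 1073741824 := by omega
        have ha2 : ¬ ((((v - 384).natAbs : Int)) < (((v - 256).natAbs : Int))) := by omega
        have ha3 : ¬ ((((v - 512).natAbs : Int)) < (((v - 256).natAbs : Int))) := by omega
        have ha4 : ¬ ((((v - 768).natAbs : Int)) < (((v - 256).natAbs : Int))) := by omega
        have ha5 : ¬ ((((v - 1024).natAbs : Int)) < (((v - 256).natAbs : Int))) := by omega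
        have ha6 : ¬ ((((v - 1536).natAbs : Int)) < (((v - 256).natAbs : Int))) := by omega
        simp only [ha1, ha2, ha3, ha4, ha5, ha6, hb1, if_true, if_false]
        try decide
      by_cases hb2 : ((v.natAbs : Int)) ≤ 448
      · -- bucket 2
        have ha1 : (((v - 256).natAbs : Int)) < 1073741824 := by omega
        have ha2 : (((v - 384).natAbs : Int)) < (((v - 256).natAbs : Int)) := by omega
        have ha3 : ¬ ((((v - 512).natAbs : Int)) < (((v - 384).natAbs : Int))) := by omega
        have ha4 : ¬ ((((v - 768).natAbs : Int)) < (((v - 384).natAbs : Int))) := by omega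
        have ha5 : ¬ ((((v - 1024).natAbs : Int)) < (((v - 384).natAbs : Int))) := by omega
        have ha6 : ¬ ((((v - 1536).natAbs : Int)) < (((v - 384).natAbs : Int))) := by omega
        simp only [ha1, ha2, ha3, ha4, ha5, ha6, hb1, hb2, if_true, if_false]
        try decide
      by_cases hb3 : ((v.natAbs : Int)) ≤ 640
      · -- bucket 3
        have ha1 : (((v - 256).natAbs : Int)) < 1073741824 := by omega
        have ha2 : (((v - 384).natAbs : Int)) < (((v - 256).natAbs : Int)) := by omega
        have ha3 : (((v - 512).natAbs : Int)) < (((v - 384).natAbs : Int)) := by omega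
        have ha4 : ¬ ((((v - 768).natAbs : Int)) < (((v - 512).natAbs : Int))) := by omega
        have ha5 : ¬ ((((v - 1024).natAbs : Int)) < (((v - 512).natAbs : Int))) := by omega
        have ha6 : ¬ ((((v - 1536).natAbs : Int)) < (((v - 512).natAbs : Int))) := by omega
        simp only [ha1, ha2, ha3, ha4, ha5, ha6, hb1, hb2, hb3, if_true, if_false]
        try decide
      by_cases hb4 : ((v.natAbs : Int)) ≤ 896
      · -- bucket 4
        have ha1 : (((v - 256).natAbs : Int)) < 1073741824 := by omega
        have ha2 : (((v - 384).natAbs : Int)) < (((v - 256).natAbs : Int)) := by omega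
        have ha3 : (((v - 512).natAbs : Int)) < (((v - 384).natAbs : Int)) := by omega
        have ha4 : (((v - 768).natAbs : Int)) < (((v - 512).natAbs : Int)) := by omega
        have ha5 : ¬ ((((v - 1024).natAbs : Int)) < (((v - 768).natAbs : Int))) := by omega
        have ha6 : ¬ ((((v - 1536).natAbs : Int)) < (((v - 768).natAbs : Int))) := by omega
        simp only [ha1, ha2, ha3, ha4, ha5, ha6, hb1, hb2, hb3, hb4, if_true, if_false]
        try decide
      by_cases hb5 : ((v.natAbs : Int)) ≤ 1280
      · -- bucket 5
        have ha1 : (((v - 256).natAbs : Int)) < 1073741824 := by omega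
        have ha2 : (((v - 384).natAbs : Int)) < (((v - 256).natAbs : Int)) := by omega
        have ha3 : (((v - 512).natAbs : Int)) < (((v - 384).natAbs : Int)) := by omega
        have ha4 : (((v - 768).natAbs : Int)) < (((v - 512).natAbs : Int)) := by omega
        have ha5 : (((v - 1024).natAbs : Int)) < (((v - 768).natAbs : Int)) := by omega
        have ha6 : ¬ ((((v - 1536).natAbs : Int)) < (((v - 1024).natAbs : Int))) := by omega
        simp only [ha1, ha2, ha3, ha4, ha5, ha6, hb1, hb2, hb3, hb4, hb5, if_true, if_false]
        try decide
      -- bucket 6, sub-split by which candidate first beats the 1 <<< 30 initializer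
      by_cases hc1 : ((v.natAbs : Int)) < 1073742080
      · -- first update at candidate 1
        have ha1 : (((v - 256).natAbs : Int)) < 1073741824 := by omega
        have ha2 : (((v - 384).natAbs : Int)) < (((v - 256).natAbs : Int)) := by omega
        have ha3 : (((v - 512).natAbs : Int)) < (((v - 384).natAbs : Int)) := by omega
        have ha4 : (((v - 768).natAbs : Int)) < (((v - 512).natAbs : Int)) := by omega
        have ha5 : (((v - 1024).natAbs : Int)) < (((v - 768).natAbs : Int)) := by omega
        have ha6 : (((v - 1536).natAbs : Int)) < (((v - 1024).natAbs : Int)) := by omega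
        simp only [ha1, ha2, ha3, ha4, ha5, ha6, hb1, hb2, hb3, hb4, hb5, hc1, if_true, if_false]
        try decide
      by_cases hc2 : ((v.natAbs : Int)) < 1073742208
      · -- first update at candidate 2
        have ha1 : ¬ ((((v - 256).natAbs : Int)) < 1073741824) := by omega
        have ha2 : (((v - 384).natAbs : Int)) < 1073741824 := by omega
        have ha3 : (((v - 512).natAbs : Int)) < (((v - 384).natAbs : Int)) := by omega
        have ha4 : (((v - 768).natAbs : Int)) < (((v - 512).natAbs : Int)) := by omega
        have ha5 : (((v - 1024).natAbs : Int)) < (((v - 768).natAbs : Int)) := by omega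
        have ha6 : (((v - 1536).natAbs : Int)) < (((v - 1024).natAbs : Int)) := by omega
        simp only [ha1, ha2, ha3, ha4, ha5, ha6, hb1, hb2, hb3, hb4, hb5, hc1, hc2, if_true, if_false]
        try decide
      by_cases hc3 : ((v.natAbs : Int)) < 1073742336
      · -- first update at candidate 3
        have ha1 : ¬ ((((v - 256).natAbs : Int)) < 1073741824) := by omega
        have ha2 : ¬ ((((v - 384).natAbs : Int)) < 1073741824) := by omega
        have ha3 : (((v - 512).natAbs : Int)) < 1073741824 := by omega
        have ha4 : (((v - 768).natAbs : Int)) < (((v - 512).natAbs : Int)) := by omega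
        have ha5 : (((v - 1024).natAbs : Int)) < (((v - 768).natAbs : Int)) := by omega
        have ha6 : (((v - 1536).natAbs : Int)) < (((v - 1024).natAbs : Int)) := by omega
        simp only [ha1, ha2, ha3, ha4, ha5, ha6, hb1, hb2, hb3, hb4, hb5, hc1, hc2, hc3, if_true, if_false]
        try decide
      by_cases hc4 : ((v.natAbs : Int)) < 1073742592
      · -- first update at candidate 4
        have ha1 : ¬ ((((v - 256).natAbs : Int)) < 1073741824) := by omega
        have ha2 : ¬ ((((v - 384).natAbs : Int)) < 1073741824) := by omega
        have ha3 : ¬ ((((v - 512).natAbs : Int)) < 1073741824) := by omega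
        have ha4 : (((v - 768).natAbs : Int)) < 1073741824 := by omega
        have ha5 : (((v - 1024).natAbs : Int)) < (((v - 768).natAbs : Int)) := by omega
        have ha6 : (((v - 1536).natAbs : Int)) < (((v - 1024).natAbs : Int)) := by omega
        simp only [ha1, ha2, ha3, ha4, ha5, ha6, hb1, hb2, hb3, hb4, hb5, hc1, hc2, hc3, hc4, if_true, if_false]
        try decide
      by_cases hc5 : ((v.natAbs : Int)) < 1073742848
      · -- first update at candidate 5
        have ha1 : ¬ ((((v - 256).natAbs : Int)) < 1073741824) := by omega
        have ha2 : ¬ ((((v - 384).natAbs : Int)) < 1073741824) := by omega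
        have ha3 : ¬ ((((v - 512).natAbs : Int)) < 1073741824) := by omega
        have ha4 : ¬ ((((v - 768).natAbs : Int)) < 1073741824) := by omega
        have ha5 : (((v - 1024).natAbs : Int)) < 1073741824 := by omega
        have ha6 : (((v - 1536).natAbs : Int)) < (((v - 1024).natAbs : Int)) := by omega
        simp only [ha1, ha2, ha3, ha4, ha5, ha6, hb1, hb2, hb3, hb4, hb5, hc1, hc2, hc3, hc4, hc5, if_true, if_false]
        try decide
      · -- first update at the last candidate (e,m)=(3,1)
        have ha1 : ¬ ((((v - 256).natAbs : Int)) < 1073741824) := by omega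
        have ha2 : ¬ ((((v - 384).natAbs : Int)) < 1073741824) := by omega
        have ha3 : ¬ ((((v - 512).natAbs : Int)) < 1073741824) := by omega
        have ha4 : ¬ ((((v - 768).natAbs : Int)) < 1073741824) := by omega
        have ha5 : ¬ ((((v - 1024).natAbs : Int)) < 1073741824) := by omega
        have ha6 : (((v - 1536).natAbs : Int)) < 1073741824 := by omega
        simp only [ha1, ha2, ha3, ha4, ha5, ha6, hb1, hb2, hb3, hb4, hb5, hc1, hc2, hc3, hc4, hc5, if_true, if_false]
        try decide

set_option maxHeartbeats 1000000 in
theorem main_ne (v : Int) (hD : D_encode_fp4 v) : encode_fp4 v ≠ encode_fp4_alt v := by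
  unfold D_encode_fp4 at hD
  rw [Int.abs_eq_natAbs] at hD
  have h0 : ¬ v = 0 := by omega
  rcases lt_or_ge v 0 with hs | hs
  ·
    simp only [encode_fp4, encode_fp4_alt, h0, pyRange14, pyRange02, List.foldl_cons,
      List.foldl_nil, hs, if_true, if_false, if_neg h0,
      show ((1:Int) - 1).toNat = 0 from by decide, show ((2:Int) - 1).toNat = 1 from by decide,
      show ((3:Int) - 1).toNat = 2 from by decide,
      show (1:Int) <<< (0:Nat) = 1 from by decide, show (1:Int) <<< (1:Nat) = 2 from by decide,
      show (1:Int) <<< (2:Nat) = 4 from by decide, show (1:Int) <<< (30:Int) = 1073741824 from by decide,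
      show ((1:Int) * (2 + 0) * 256) >>> 1 = 256 from by decide,
      show ((1:Int) * (2 + 1) * 256) >>> 1 = 384 from by decide,
      show ((2:Int) * (2 + 0) * 256) >>> 1 = 512 from by decide,
      show ((2:Int) * (2 + 1) * 256) >>> 1 = 768 from by decide,
      show ((4:Int) * (2 + 0) * 256) >>> 1 = 1024 from by decide,
      show ((4:Int) * (2 + 1) * 256) >>> 1 = 1536 from by decide,
      show (5 * 256 / 4 : Int) = 320 from by decide, show (7 * 256 / 4 : Int) = 448 from by decide,
      show (5 * 256 / 2 : Int) = 640 from by decide, show (7 * 256 / 2 : Int) = 896 from by decide,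
      show (5 * 256 : Int) = 1280 from by decide,
      show ((1280:Int) / 4) = 320 from by decide, show ((1280:Int) / 2) = 640 from by decide]
    simp only [Int.abs_eq_natAbs]
    have ha1 : ¬ ((((-v - 256).natAbs : Int)) < 1073741824) := by omega
    have ha2 : ¬ ((((-v - 384).natAbs : Int)) < 1073741824) := by omega
    have ha3 : ¬ ((((-v - 512).natAbs : Int)) < 1073741824) := by omega
    have ha4 : ¬ ((((-v - 768).natAbs : Int)) < 1073741824) := by omega
    have ha5 : ¬ ((((-v - 1024).natAbs : Int)) < 1073741824) := by omega
    have ha6 : ¬ ((((-v - 1536).natAbs : Int)) < 1073741824) := by omega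
    have hb1 : ¬ (((v.natAbs : Int)) ≤ 320) := by omega
    have hb2 : ¬ (((v.natAbs : Int)) ≤ 448) := by omega
    have hb3 : ¬ (((v.natAbs : Int)) ≤ 640) := by omega
    have hb4 : ¬ (((v.natAbs : Int)) ≤ 896) := by omega
    have hb5 : ¬ (((v.natAbs : Int)) ≤ 1280) := by omega
    simp only [ha1, ha2, ha3, ha4, ha5, ha6, hb1, hb2, hb3, hb4, hb5, if_true, if_false]
    decide
  ·
    simp only [encode_fp4, encode_fp4_alt, h0, pyRange14, pyRange02, List.foldl_cons,
      List.foldl_nil, show ¬ (v < 0) from not_lt.mpr hs, if_true, if_false, if_neg h0,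
      show ((1:Int) - 1).toNat = 0 from by decide, show ((2:Int) - 1).toNat = 1 from by decide,
      show ((3:Int) - 1).toNat = 2 from by decide,
      show (1:Int) <<< (0:Nat) = 1 from by decide, show (1:Int) <<< (1:Nat) = 2 from by decide,
      show (1:Int) <<< (2:Nat) = 4 from by decide, show (1:Int) <<< (30:Int) = 1073741824 from by decide,
      show ((1:Int) * (2 + 0) * 256) >>> 1 = 256 from by decide,
      show ((1:Int) * (2 + 1) * 256) >>> 1 = 384 from by decide,
      show ((2:Int) * (2 + 0) * 256) >>> 1 = 512 from by decide,
      show ((2:Int) * (2 + 1) * 256) >>> 1 = 768 from by decide,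
      show ((4:Int) * (2 + 0) * 256) >>> 1 = 1024 from by decide,
      show ((4:Int) * (2 + 1) * 256) >>> 1 = 1536 from by decide,
      show (5 * 256 / 4 : Int) = 320 from by decide, show (7 * 256 / 4 : Int) = 448 from by decide,
      show (5 * 256 / 2 : Int) = 640 from by decide, show (7 * 256 / 2 : Int) = 896 from by decide,
      show (5 * 256 : Int) = 1280 from by decide,
      show ((1280:Int) / 4) = 320 from by decide, show ((1280:Int) / 2) = 640 from by decide]
    simp only [Int.abs_eq_natAbs]
    have ha1 : ¬ ((((v - 256).natAbs : Int)) < 1073741824) := by omega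
    have ha2 : ¬ ((((v - 384).natAbs : Int)) < 1073741824) := by omega
    have ha3 : ¬ ((((v - 512).natAbs : Int)) < 1073741824) := by omega
    have ha4 : ¬ ((((v - 768).natAbs : Int)) < 1073741824) := by omega
    have ha5 : ¬ ((((v - 1024).natAbs : Int)) < 1073741824) := by omega
    have ha6 : ¬ ((((v - 1536).natAbs : Int)) < 1073741824) := by omega
    have hb1 : ¬ (((v.natAbs : Int)) ≤ 320) := by omega
    have hb2 : ¬ (((v.natAbs : Int)) ≤ 448) := by omega
    have hb3 : ¬ (((v.natAbs : Int)) ≤ 640) := by omega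
    have hb4 : ¬ (((v.natAbs : Int)) ≤ 896) := by omega
    have hb5 : ¬ (((v.natAbs : Int)) ≤ 1280) := by omega
    simp only [ha1, ha2, ha3, ha4, ha5, ha6, hb1, hb2, hb3, hb4, hb5, if_true, if_false]
    decide

-- ===== VERDICT (by name: the statement is the Claim_ definition above) =====
theorem encode_fp4_spec : Claim_unchanged_encode_fp4 := by
  intro v _ hD
  exact main_eq v hD
theorem encode_fp4_changed : Claim_changed_encode_fp4 := by unfold Claim_changed_encode_fp4; decide
theorem encode_fp4_tight : Claim_exact_encode_fp4 := by
  intro v _ hD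
  exact main_ne v hD
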